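-- pv_equiv track=rewrite | github.com/vivasvan1/balatro-dqn-agent | src/balatro_agent/main.py | decode_action
-- ===== SOURCE A (Python) =====
-- from typing import Dict, Any, Optional, List, Union, Tuple
--
-- def decode_action(action_value: int) -> Tuple[List[int], str]:
--     """
--     Decodes an integer action_value into selected card indices and action type.
--     """
--     # Last bit (0 or 1) determines play/discard
--     action_type = "discard" if action_value & 1 else "play"
--
--     # The other 8 bits determine card selection (up to 8 cards, we will cap at 5)
--     card_selection_bits = action_value >> 1
--     selected_indices = []
--     for i in range(8):  # Iterate through bits for cards 1 to 8
--         if (card_selection_bits >> i) & 1:  # Check if the i-th bit is set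
--             selected_indices.append(i + 1)  # Add 1-based card index
--             if len(selected_indices) == 5:  # Max 5 cards
--                 break
--     return selected_indices, action_type
-- ===== SOURCE B (Python) =====
-- def decode_action(action_value):
--     # Last bit selects the action type; bits 1-8 (masked to 8 bits) select cards.
--     action_type = "discard" if action_value & 1 else "play"
--     bits = (action_value >> 1) & 0xFF
--     selected = []
--     while bits and len(selected) < 5:
--         low = bits & -bits          # lowest set bit
--         selected.append(low.bit_length())  # 1-based card index
--         bits ^= low                 # clear it
--     return selected, action_type
-- ===== Notes on version B (the rewrite author's own statement) =====
-- stated objective: idiomatic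
-- what changed: B masks the shifted value down to one byte once and then loops over set bits only, extracting the lowest set bit and reading its one-based index via bit_length(), instead of A's fixed scan over every bit position with an inner break.
import Mathlib
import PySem

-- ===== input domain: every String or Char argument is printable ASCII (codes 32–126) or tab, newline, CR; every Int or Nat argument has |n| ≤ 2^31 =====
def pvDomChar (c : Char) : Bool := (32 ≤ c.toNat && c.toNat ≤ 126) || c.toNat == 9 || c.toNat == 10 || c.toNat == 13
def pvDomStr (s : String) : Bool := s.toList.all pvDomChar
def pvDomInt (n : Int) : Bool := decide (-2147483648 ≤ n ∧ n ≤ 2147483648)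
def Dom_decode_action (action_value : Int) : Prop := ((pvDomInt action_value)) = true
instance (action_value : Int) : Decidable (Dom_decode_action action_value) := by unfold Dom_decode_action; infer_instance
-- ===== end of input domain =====

-- B loops over set bits of the masked byte (lowest-set-bit + bit_length) instead of A's fixed scan over every bit position; objective: more idiomatic.


-- ===== PORT A =====
-- A's for-loop over range(8): test bit i, append i+1, break when 5 cards are selected
def decodeLoop (bits : Int) : List Int → List Int → List Int
  | [], acc => acc
  | i :: rest, acc =>
    if PySem.Int.band (bits >>> i.toNat) 1 ≠ 0 then
      let acc' := acc ++ [i + 1]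
      if acc'.length = 5 then acc' else decodeLoop bits rest acc'
    else decodeLoop bits rest acc

def decode_action (action_value : Int) : List Int × String :=
  let action_type := if PySem.Int.band action_value 1 ≠ 0 then "discard" else "play"
  let card_selection_bits := action_value >>> 1
  (decodeLoop card_selection_bits (PySem.List.pyRange 0 8 1) [], action_type)

-- ===== PORT B =====
-- B's while-loop: peel the lowest set bit; the fuel 8 only makes the loop total
-- (bits < 256 has at most 8 set bits, so the while-condition itself always ends the loop)
def altLoop : Nat → Int → List Int → List Int
  | 0, _, sel => sel
  | f + 1, bits, sel =>
    if bits ≠ 0 ∧ sel.length < 5 then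
      let low := PySem.Int.band bits (-bits)
      altLoop f (PySem.Int.bxor bits low) (sel ++ [(PySem.Int.bitLength low : Int)])
    else sel

def decode_action_alt (action_value : Int) : List Int × String :=
  let action_type := if PySem.Int.band action_value 1 ≠ 0 then "discard" else "play"
  let bits := PySem.Int.band (action_value >>> 1) 255
  (altLoop 8 bits [], action_type)

-- ===== PRECONDITION & SPEC =====
def Spec_decode_action (action_value : Int) (out : List Int × String) : Prop := out = decode_action_alt action_value
instance (action_value : Int) (out : List Int × String) : Decidable (Spec_decode_action action_value out) := by unfold Spec_decode_action; infer_instance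

-- ===== CLAIM (what is proved, stated in full; the proofs are below) =====
def Claim_equal_decode_action : Prop := ∀ (action_value : Int), Dom_decode_action action_value → Spec_decode_action action_value (decode_action action_value)

-- ===== LEMMAS AND PROOFS =====

-- Python's a & 255 is a mod 256 (also for negative a)
theorem band_255_eq_emod (a : Int) : PySem.Int.band a 255 = a % 256 := by
  unfold PySem.Int.band
  split_ifs with h1 h2 h2
  · have : a.toNat &&& (255 : Int).toNat = a.toNat % 256 := Nat.and_two_pow_sub_one_eq_mod a.toNat 8
    rw [this]; omega
  · omega
  · have : (255 : Int).toNat &&& (-a - 1).toNat = (-a - 1).toNat % 256 := by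
      rw [Nat.and_comm]; exact Nat.and_two_pow_sub_one_eq_mod (-a - 1).toNat 8
    rw [this]; omega
  · omega

-- the i-th bit test (i < 8) only depends on a mod 256
theorem bit_test_emod (b : Int) (i : Nat) (hi : i < 8) :
    PySem.Int.band (b >>> i) 1 = PySem.Int.band ((b % 256) >>> i) 1 := by
  rw [PySem.Int.band_one, PySem.Int.band_one]
  unfold PySem.Int.mod
  rw [Int.shiftRight_eq_div_pow, Int.shiftRight_eq_div_pow]
  simp only [Int.fmod_eq_emod]
  norm_num
  interval_cases i <;> norm_num <;> omega

-- A's loop gives the same result for two bit sources that agree on bits 0..7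
theorem decodeLoop_congr (b c : Int)
    (h : ∀ i : Nat, i < 8 → PySem.Int.band (b >>> i) 1 = PySem.Int.band (c >>> i) 1) :
    ∀ (l : List Int) (acc : List Int), (∀ x ∈ l, 0 ≤ x ∧ x < 8) →
      decodeLoop b l acc = decodeLoop c l acc := by
  intro l
  induction l with
  | nil => intro acc _; rfl
  | cons i rest ih =>
    intro acc hmem
    have hx := hmem i (List.mem_cons_self ..)
    have hb : PySem.Int.band (b >>> i.toNat) 1 = PySem.Int.band (c >>> i.toNat) 1 :=
      h i.toNat (by omega)
    simp only [decodeLoop, hb]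
    split_ifs <;> first
      | rfl
      | exact ih _ (fun x hxm => hmem x (List.mem_cons_of_mem _ hxm))

-- the finite core: for every 8-bit value, A's scan equals B's set-bit extraction
set_option maxRecDepth 8192 in
theorem core_check : ∀ m : Fin 256,
    decodeLoop (m : Int) (PySem.List.pyRange 0 8 1) [] = altLoop 8 (m : Int) [] := by decide

-- ===== VERDICT (by name: the statement is the Claim_ definition above) =====
theorem decode_action_spec : Claim_equal_decode_action := by
  intro a _
  unfold Spec_decode_action decode_action decode_action_alt
  simp only [Prod.mk.injEq]
  refine ⟨?_, trivial⟩
  rw [band_255_eq_emod]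
  set b := a >>> 1 with hb
  have h0 : 0 ≤ b % 256 := Int.emod_nonneg _ (by norm_num)
  have h1 : b % 256 < 256 := Int.emod_lt_of_pos _ (by norm_num)
  rw [decodeLoop_congr b (b % 256) (fun i hi => bit_test_emod b i hi) _ []
        (by intro x hx; rw [PySem.List.mem_pyRange_one] at hx; omega)]
  have hm := core_check ⟨(b % 256).toNat, by omega⟩
  simpa [Int.toNat_of_nonneg h0] using hm
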